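-- pv_equiv track=rewrite | github.com/NilKel/nest-splatting | train.py | is_gpu_error
-- ===== SOURCE A (Python) =====
-- def is_gpu_error(error):
--     """Check if an exception is a GPU-related error that warrants retry."""
--     error_str = str(error).lower()
--     gpu_error_patterns = [
--         "cuda",
--         "out of memory",
--         "illegal memory access",
--         "device-side assert",
--         "nccl",
--         "cublas",
--         "cudnn",
--         "gpu",
--         "tinycudann",
--         "compute capability",
--     ]
--     return any(pattern in error_str for pattern in gpu_error_patterns)
-- ===== SOURCE B (Python) =====
-- def is_gpu_error(error):
--     """Single left-to-right scan: at each position, test whether some pattern starts there."""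
--     error_str = str(error).lower()
--     gpu_error_patterns = [
--         "cuda",
--         "out of memory",
--         "illegal memory access",
--         "device-side assert",
--         "nccl",
--         "cublas",
--         "cudnn",
--         "gpu",
--         "tinycudann",
--         "compute capability",
--     ]
--     for i in range(len(error_str) + 1):
--         for pattern in gpu_error_patterns:
--             if error_str.startswith(pattern, i):
--                 return True
--     return False
-- ===== Notes on version B (the rewrite author's own statement) =====
-- stated objective: alternative
-- what changed: Replaces the ten independent full substring scans ('pattern in error_str' per pattern) by one left-to-right scan over the string that tests at each position whether any pattern starts there (prefix match), so the string is traversed once by position instead of once per pattern.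
import Mathlib
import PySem

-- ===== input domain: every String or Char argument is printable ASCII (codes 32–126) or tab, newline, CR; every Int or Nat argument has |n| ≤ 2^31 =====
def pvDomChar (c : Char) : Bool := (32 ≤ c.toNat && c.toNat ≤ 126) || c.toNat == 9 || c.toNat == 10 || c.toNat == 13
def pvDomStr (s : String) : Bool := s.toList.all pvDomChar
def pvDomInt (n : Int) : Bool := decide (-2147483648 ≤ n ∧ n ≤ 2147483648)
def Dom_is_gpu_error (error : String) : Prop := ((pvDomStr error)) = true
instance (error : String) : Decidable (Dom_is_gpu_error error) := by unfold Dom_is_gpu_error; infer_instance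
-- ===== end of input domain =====

-- B replaces A's ten independent substring scans by one positional left-to-right scan
-- testing prefix matches at each position (objective: alternative; same asymptotic cost).

-- ===== PORT A =====
def is_gpu_error (error : String) : Bool :=
  let error_str := PySem.Str.lower error
  let gpu_error_patterns : List String :=
    ["cuda", "out of memory", "illegal memory access", "device-side assert",
     "nccl", "cublas", "cudnn", "gpu", "tinycudann", "compute capability"]
  gpu_error_patterns.any (fun pattern => PySem.Str.isIn pattern error_str)

-- ===== PORT B =====
def gpuPatternsB : List (List Char) :=
  ["cuda".toList, "out of memory".toList, "illegal memory access".toList,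
   "device-side assert".toList, "nccl".toList, "cublas".toList, "cudnn".toList,
   "gpu".toList, "tinycudann".toList, "compute capability".toList]

-- Source B's position loop: recursion over the suffixes of the string, prefix test at each position
def gpuScanB (cs : List Char) : Bool :=
  if gpuPatternsB.any (fun p => p.isPrefixOf cs) then true
  else
    match cs with
    | [] => false
    | _ :: t => gpuScanB t

def is_gpu_error_alt (error : String) : Bool :=
  gpuScanB (PySem.Str.lower error).toList

-- ===== PRECONDITION & SPEC =====
def Spec_is_gpu_error (error : String) (out : Bool) : Prop := out = is_gpu_error_alt error
instance (error : String) (out : Bool) : Decidable (Spec_is_gpu_error error out) := by unfold Spec_is_gpu_error; infer_instance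

-- ===== CLAIM (what is proved, stated in full; the proofs are below) =====
def Claim_equal_is_gpu_error : Prop := ∀ (error : String), Dom_is_gpu_error error → Spec_is_gpu_error error (is_gpu_error error)

-- ===== LEMMAS AND PROOFS =====

-- the positional scan decides "some pattern is an infix"
lemma gpuScanB_eq_any_isIn (cs : List Char) :
    gpuScanB cs = gpuPatternsB.any (fun p => PySem.Chars.isIn p cs) := by
  induction cs with
  | nil => decide
  | cons c t ih =>
    rw [gpuScanB]
    rcases h : gpuPatternsB.any (fun p => p.isPrefixOf (c :: t)) with _ | _
    · simp only [Bool.false_eq_true, if_false, ih]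
      apply Bool.eq_iff_iff.mpr
      simp only [List.any_eq_true, PySem.Chars.isIn_iff_infix]
      constructor
      · rintro ⟨p, hp, hinf⟩
        exact ⟨p, hp, (List.infix_cons_iff.mpr (Or.inr hinf))⟩
      · rintro ⟨p, hp, hinf⟩
        rcases List.infix_cons_iff.mp hinf with hpre | hinf'
        · have hall : gpuPatternsB.any (fun q => q.isPrefixOf (c :: t)) = true :=
            List.any_eq_true.mpr ⟨p, hp, List.isPrefixOf_iff_prefix.mpr hpre⟩
          rw [h] at hall
          exact absurd hall (by simp)
        · exact ⟨p, hp, hinf'⟩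
    · simp only [if_true]
      symm
      simp only [List.any_eq_true, PySem.Chars.isIn_iff_infix]
      rcases List.any_eq_true.mp h with ⟨p, hp, hpre⟩
      exact ⟨p, hp, (List.isPrefixOf_iff_prefix.mp hpre).isInfix⟩

-- ===== VERDICT (by name: the statement is the Claim_ definition above) =====
theorem is_gpu_error_spec : Claim_equal_is_gpu_error := by
  intro error _
  unfold Spec_is_gpu_error is_gpu_error is_gpu_error_alt
  rw [gpuScanB_eq_any_isIn]
  simp only [gpuPatternsB, List.any_cons, List.any_nil, PySem.Str.isIn_eq]
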